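-- pv_equiv track=rewrite | github.com/pravin-python/work_detection | src/features/keyboard_features.py | _max_consecutive_repeats
-- ===== SOURCE A (Python) =====
-- from typing import List, Dict, Any
--
-- def _max_consecutive_repeats(keys: List[str]) -> int:
--     """Calculate maximum consecutive repeats of the same key"""
--     if not keys:
--         return 0
--
--     max_count = 1
--     current_count = 1
--
--     for i in range(1, len(keys)):
--         if keys[i] == keys[i-1]:
--             current_count += 1
--             max_count = max(max_count, current_count)
--         else:
--             current_count = 1
--
--     return max_count
-- ===== SOURCE B (Python) =====
-- from typing import List
--
--
-- def _max_consecutive_repeats(keys: List[str]) -> int: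
--     """Calculate maximum consecutive repeats of the same key"""
--     cuts = [i for i, (a, b) in enumerate(zip(keys, keys[1:]), 1) if a != b]
--     bounds = [0] + cuts + [len(keys)]
--     return max((b - a for a, b in zip(bounds, bounds[1:])), default=0)
-- ===== Notes on version B (the rewrite author's own statement) =====
-- stated objective: alternative
-- what changed: Replaces A's incremental running-count/running-max state machine with a staged change-point algorithm: first materialize the list of boundary indices where adjacent keys differ, pad it with 0 and len(keys), then return the maximum gap between consecutive boundaries.
import Mathlib
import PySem

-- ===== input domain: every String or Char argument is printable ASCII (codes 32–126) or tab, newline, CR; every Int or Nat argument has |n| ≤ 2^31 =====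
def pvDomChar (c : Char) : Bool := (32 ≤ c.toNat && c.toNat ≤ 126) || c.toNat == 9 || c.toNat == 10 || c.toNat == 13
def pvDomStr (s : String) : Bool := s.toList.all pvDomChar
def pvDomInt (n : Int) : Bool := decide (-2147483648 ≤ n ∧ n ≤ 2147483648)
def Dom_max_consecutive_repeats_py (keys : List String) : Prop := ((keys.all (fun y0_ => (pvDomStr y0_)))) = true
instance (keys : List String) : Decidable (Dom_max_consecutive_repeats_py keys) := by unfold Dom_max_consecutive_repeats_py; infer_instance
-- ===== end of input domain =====

-- B replaces A's running-count/running-max scan with a staged change-point algorithm: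
-- collect the boundary indices where the key changes, then return the maximum gap
-- between consecutive boundaries; same return value, same O(n) cost.

-- ===== PORT A =====
def max_consecutive_repeats_py (keys : List String) : Int :=
  if keys = [] then 0
  else
    ((PySem.List.pyRange 1 (keys.length : Int) 1).foldl
      (fun (st : Int × Int) i =>
        if PySem.List.pyGetD keys i "" == PySem.List.pyGetD keys (i - 1) "" then
          (max st.1 (st.2 + 1), st.2 + 1)
        else (st.1, 1))
      (1, 1)).1

-- ===== PORT B =====
-- cuts = [i for i, (a, b) in enumerate(zip(keys, keys[1:]), 1) if a != b]
-- bounds = [0] + cuts + [len(keys)]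
-- max((b - a for a, b in zip(bounds, bounds[1:])), default=0)
def max_consecutive_repeats_py_alt (keys : List String) : Int :=
  let cuts :=
    ((PySem.List.enumerate (keys.zip (PySem.List.slice keys (some 1) none)) 1).filter
        (fun p => !(p.2.1 == p.2.2))).map (fun p => p.1)
  let bounds : List Int := 0 :: (cuts ++ [(keys.length : Int)])
  PySem.List.maxD
    ((bounds.zip (PySem.List.slice bounds (some 1) none)).map (fun p => p.2 - p.1))
    (fun x => x) 0

-- ===== PRECONDITION & SPEC =====
def Spec_max_consecutive_repeats_py (keys : List String) (out : Int) : Prop := out = max_consecutive_repeats_py_alt keys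
instance (keys : List String) (out : Int) : Decidable (Spec_max_consecutive_repeats_py keys out) := by unfold Spec_max_consecutive_repeats_py; infer_instance

-- ===== CLAIM (what is proved, stated in full; the proofs are below) =====
def Claim_equal_max_consecutive_repeats_py : Prop := ∀ (keys : List String), Dom_max_consecutive_repeats_py keys → Spec_max_consecutive_repeats_py keys (max_consecutive_repeats_py keys)

-- ===== LEMMAS AND PROOFS =====

-- the maximal runs of equal consecutive elements, and their lengths
def pyGroupRuns (l : List String) : List (List String) :=
  match l with
  | [] => []
  | x :: xs =>
      (x :: xs.takeWhile (fun y => y == x)) :: pyGroupRuns (xs.dropWhile (fun y => y == x))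
termination_by l.length
decreasing_by
  simpa using Nat.lt_succ_of_le (List.length_dropWhile_le (fun y => y == x) xs)

def runLens (l : List String) : List Int := (pyGroupRuns l).map (fun g => (g.length : Int))

lemma pyGroupRuns_nil : pyGroupRuns [] = [] := by rw [pyGroupRuns]

lemma pyGroupRuns_cons (x : String) (xs : List String) :
    pyGroupRuns (x :: xs)
      = (x :: xs.takeWhile (fun y => y == x)) :: pyGroupRuns (xs.dropWhile (fun y => y == x)) := by
  rw [pyGroupRuns]

lemma runLens_cons (x : String) (xs : List String) :
    runLens (x :: xs)
      = (1 + ((xs.takeWhile (fun y => y == x)).length : Int))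
          :: runLens (xs.dropWhile (fun y => y == x)) := by
  unfold runLens
  rw [pyGroupRuns_cons]
  simp only [List.map_cons, List.length_cons]
  congr 1
  push_cast
  omega

-- ---------- A-side: the scan computes the maximum run length ----------

-- A's loop body, over the remaining suffix, carrying the previous key and (best, current)
def auxA (k : String) (st : Int × Int) : List String → Int × Int
  | [] => st
  | x :: xs =>
      auxA x (if x == k then (max st.1 (st.2 + 1), st.2 + 1) else (st.1, 1)) xs

-- running max of run lengths
def runMax (rs : List (List String)) (acc : Int) : Int :=
  rs.foldl (fun a g => max a (g.length : Int)) acc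

lemma foldl_idx (l : List String) :
    ∀ (n a : Nat) (st : Int × Int), a + n = l.length → 0 < a →
    (PySem.List.pyRange (a : Int) (l.length : Int) 1).foldl
      (fun (st : Int × Int) i =>
        if PySem.List.pyGetD l i "" == PySem.List.pyGetD l (i - 1) "" then
          (max st.1 (st.2 + 1), st.2 + 1)
        else (st.1, 1)) st
    = auxA (l.getD (a - 1) "") st (l.drop a) := by
  intro n
  induction n with
  | zero =>
      intro a st ha _
      rw [PySem.List.pyRange_one_eq_nil (by omega)]
      rw [List.drop_eq_nil_of_le (by omega)]
      rfl
  | succ m ih =>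
      intro a st ha hpos
      have hlt : a < l.length := by omega
      rw [PySem.List.pyRange_one_cons (by exact_mod_cast hlt)]
      rw [List.foldl_cons]
      have h1 : ((a : Int) - 1) = ((a - 1 : Nat) : Int) := by omega
      have h2 : ((a : Int) + 1) = ((a + 1 : Nat) : Int) := by omega
      rw [h1, h2, PySem.List.pyGetD_natCast, PySem.List.pyGetD_natCast]
      have hdrop : l.drop a = l[a] :: l.drop (a + 1) := List.drop_eq_getElem_cons hlt
      have hgetD : l.getD a "" = l[a] := List.getD_eq_getElem l "" hlt
      rw [hdrop]
      simp only [auxA, hgetD]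
      have := ih (a + 1) (if l[a] == l.getD (a - 1) "" then (max st.1 (st.2 + 1), st.2 + 1)
                          else (st.1, 1)) (by omega) (by omega)
      simp only [Nat.add_sub_cancel] at this
      rw [hgetD] at this
      exact this

lemma auxA_runs_aux :
    ∀ (n : Nat) (ks : List String), ks.length ≤ n → ∀ (k : String) (b c : Int), 1 ≤ c → c ≤ b →
    (auxA k (b, c) ks).1
      = runMax (pyGroupRuns (ks.dropWhile (fun y => y == k)))
          (max b (c + ((ks.takeWhile (fun y => y == k)).length : Int))) := by
  intro n
  induction n with
  | zero =>
      intro ks hlen k b c h1 hcb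
      have : ks = [] := List.eq_nil_of_length_eq_zero (Nat.le_zero.mp hlen)
      subst this
      simp [auxA, runMax, pyGroupRuns_nil, max_eq_left hcb]
  | succ m ih =>
      intro ks hlen k b c h1 hcb
      match ks with
      | [] => simp [auxA, runMax, pyGroupRuns_nil, max_eq_left hcb]
      | x :: xs =>
        have hxs : xs.length ≤ m := by simp at hlen; omega
        by_cases hx : x == k
        · simp only [auxA, hx, if_pos, List.takeWhile_cons, List.dropWhile_cons]
          rw [ih xs hxs x (max b (c + 1)) (c + 1) (by omega) (le_max_right _ _)]
          have hxk : x = k := by simpa using hx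
          subst hxk
          congr 1
          simp only [List.length_cons]
          push_cast
          omega
        · simp only [auxA, hx, if_neg, Bool.false_eq_true, not_false_iff,
            List.takeWhile_cons, List.dropWhile_cons]
          rw [ih xs hxs x b 1 (le_refl 1) (le_trans h1 hcb)]
          rw [pyGroupRuns_cons]
          simp only [runMax, List.foldl_cons, List.length_cons, List.length_nil]
          congr 1
          push_cast
          omega

lemma auxA_runs (ks : List String) (k : String) (b c : Int) (h1 : 1 ≤ c) (hcb : c ≤ b) :
    (auxA k (b, c) ks).1
      = runMax (pyGroupRuns (ks.dropWhile (fun y => y == k)))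
          (max b (c + ((ks.takeWhile (fun y => y == k)).length : Int))) :=
  auxA_runs_aux ks.length ks le_rfl k b c h1 hcb

lemma maxD_id_cons (x : Int) (t : List Int) :
    PySem.List.maxD (x :: t) (fun y => y) 0 = t.foldl max x := by
  unfold PySem.List.maxD
  rw [PySem.List.max?_id_cons]
  rfl

-- A equals the maximum of the run lengths
lemma A_eq_maxRuns (keys : List String) :
    max_consecutive_repeats_py keys = PySem.List.maxD (runLens keys) (fun x => x) 0 := by
  match keys with
  | [] =>
      simp [max_consecutive_repeats_py, runLens, pyGroupRuns_nil,
        PySem.List.maxD, PySem.List.max?]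
  | k :: ks =>
      unfold max_consecutive_repeats_py
      rw [if_neg (by simp)]
      have hlen : (1 : Nat) + ks.length = (k :: ks).length := by simp [Nat.add_comm]
      have := foldl_idx (k :: ks) ks.length 1 (1, 1) hlen (by omega)
      simp only [Nat.cast_one, show (1:Nat)-1 = 0 from rfl, List.getD_cons_zero,
        List.drop_one, List.tail_cons] at this
      rw [this]
      rw [auxA_runs ks k 1 1 (le_refl 1) (le_refl 1)]
      rw [runLens_cons, maxD_id_cons]
      unfold runMax runLens
      rw [List.foldl_map]
      congr 1
      omega

-- ---------- B-side: change points and gaps give the run lengths ----------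

-- the change-point indices, written as a recursion on adjacent pairs
def cutsF (a : Int) : List String → List Int
  | [] => []
  | [_] => []
  | x :: y :: r => if x == y then cutsF (a + 1) (y :: r) else a :: cutsF (a + 1) (y :: r)

-- the port's comprehension over enumerate(zip(keys, keys[1:]), a) computes cutsF a keys
lemma cuts_eq : ∀ (l : List String) (a : Int),
    ((PySem.List.enumerate (l.zip l.tail) a).filter
        (fun p => !(p.2.1 == p.2.2))).map (fun p => p.1) = cutsF a l := by
  intro l
  induction l with
  | nil => intro a; rfl
  | cons x xs ih =>
      intro a
      match xs with
      | [] => rfl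
      | y :: r =>
          simp only [List.tail_cons, List.zip_cons_cons, PySem.List.enumerate_cons,
            List.filter_cons]
          by_cases h : (x == y) = true
          · have hc : cutsF a (x :: y :: r) = cutsF (a + 1) (y :: r) := by
              simp only [cutsF]; rw [if_pos h]
            rw [hc]
            simp only [h, Bool.not_true]
            have := ih (a + 1)
            simpa using this
          · have hc : cutsF a (x :: y :: r) = a :: cutsF (a + 1) (y :: r) := by
              simp only [cutsF]; rw [if_neg h]
            have hb : (x == y) = false := by simpa using h
            rw [hc]
            simp only [hb, Bool.not_false, if_true, List.map_cons]
            have := ih (a + 1)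
            simp only [List.tail_cons] at this
            simpa using this

-- gap list of a bounds list
def gapsF (bs : List Int) : List Int := (bs.zip bs.tail).map (fun p => p.2 - p.1)

lemma gapsF_cons₂ (b c : Int) (r : List Int) :
    gapsF (b :: c :: r) = (c - b) :: gapsF (c :: r) := by
  simp [gapsF]

-- the gaps of [b] ++ cuts ++ [last index] are exactly the run lengths
lemma gaps_cutsF : ∀ (l : List String) (x : String) (b a : Int),
    gapsF (b :: (cutsF a (x :: l) ++ [a + (l.length : Int)]))
      = (a - b + ((l.takeWhile (fun y => y == x)).length : Int))
          :: runLens (l.dropWhile (fun y => y == x)) := by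
  intro l
  induction l with
  | nil =>
      intro x b a
      simp [cutsF, gapsF, runLens, pyGroupRuns_nil]
  | cons y ys ih =>
      intro x b a
      by_cases h : (x == y) = true
      · have hxy : x = y := by simpa using h
        subst hxy
        have hc : cutsF a (x :: x :: ys) = cutsF (a + 1) (x :: ys) := by
          simp only [cutsF]; rw [if_pos h]
        have ht : (x :: ys).takeWhile (fun z => z == x) = x :: ys.takeWhile (fun z => z == x) := by
          simp
        have hd : (x :: ys).dropWhile (fun z => z == x) = ys.dropWhile (fun z => z == x) := by
          simp
        rw [hc, ht, hd]
        have harith : a + (((ys.length + 1 : Nat)) : Int) = (a + 1) + (ys.length : Int) := by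
          push_cast; ring
        rw [List.length_cons, harith, ih x b (a + 1)]
        congr 1
        simp only [List.length_cons]
        push_cast
        omega
      · have hne : x ≠ y := by simpa using h
        have hyx : (y == x) = false := beq_eq_false_iff_ne.mpr (Ne.symm hne)
        have hc : cutsF a (x :: y :: ys) = a :: cutsF (a + 1) (y :: ys) := by
          simp only [cutsF]; rw [if_neg h]
        have ht : (y :: ys).takeWhile (fun z => z == x) = [] := by
          simp [hyx]
        have hd : (y :: ys).dropWhile (fun z => z == x) = y :: ys := by
          simp [hyx]
        rw [hc, ht, hd]
        have harith : a + (((ys.length + 1 : Nat)) : Int) = (a + 1) + (ys.length : Int) := by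
          push_cast; ring
        rw [List.length_cons, harith, List.cons_append, gapsF_cons₂, ih y a (a + 1), runLens_cons]
        congr 1
        · simp
        · congr 1
          omega

-- B equals the maximum of the run lengths
lemma B_eq_maxRuns (keys : List String) :
    max_consecutive_repeats_py_alt keys = PySem.List.maxD (runLens keys) (fun x => x) 0 := by
  unfold max_consecutive_repeats_py_alt
  simp only [PySem.List.slice_from_one, cuts_eq]
  match keys with
  | [] =>
      simp [cutsF, runLens, pyGroupRuns_nil, PySem.List.maxD, PySem.List.max?]
  | x :: ks =>
      have hg := gaps_cutsF ks x 0 1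
      have hlen : ((x :: ks).length : Int) = 1 + (ks.length : Int) := by
        simp only [List.length_cons]; push_cast; ring
      rw [hlen]
      show PySem.List.maxD (gapsF (0 :: (cutsF 1 (x :: ks) ++ [1 + (ks.length : Int)]))) (fun x => x) 0 = _
      rw [hg, runLens_cons]
      norm_num

-- ===== VERDICT (by name: the statement is the Claim_ definition above) =====
theorem max_consecutive_repeats_py_spec : Claim_equal_max_consecutive_repeats_py := by
  intro keys _
  unfold Spec_max_consecutive_repeats_py
  rw [A_eq_maxRuns, B_eq_maxRuns]
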